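-- pv_equiv track=rewrite | github.com/DancingOnAir/LeetcodePythonSolution | String/1573_number_of_ways_to_split_a_string.py | numWays
-- ===== SOURCE A (Python) =====
-- def numWays(s: str) -> int:
--     MOD = 10 ** 9 + 7
--     n = len(s)
--     if n < 3:
--         return 0
--
--     num_ones = sum(map(int, s))
--     q, r = divmod(num_ones, 3)
--     if r:
--         return 0
--     if not q:
--         return ((n - 2) * (n - 1) // 2) % MOD
--
--     def count_zeros(ss: str):
--         ones = 0
--         idx = 0
--         while ones < q:
--             ones += 1 if ss[idx] == '1' else 0
--             idx += 1
--         return ss.find('1', idx) - idx + 1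
--
--     l = count_zeros(s)
--     r = count_zeros(s[::-1])
--     return (l * r) % MOD
-- ===== SOURCE B (Python) =====
-- def numWays(s: str) -> int:
--     MOD = 10 ** 9 + 7
--     n = len(s)
--     if n < 3:
--         return 0
--     pos = [i for i, c in enumerate(s) if c == '1']
--     m = len(pos)
--     if m % 3:
--         return 0
--     if m == 0:
--         return (n - 2) * (n - 1) // 2 % MOD
--     q = m // 3
--     return (pos[q] - pos[q - 1]) * (pos[2 * q] - pos[2 * q - 1]) % MOD
-- ===== Notes on version B (the rewrite author's own statement) =====
-- stated objective: simpler
-- what changed: B collects the indices of the ones once and reads both cut gaps by subtracting neighbouring positions, replacing A's two directional counting scans (a while loop plus str.find, repeated on the reversed string); Pre_ excludes non-binary strings of length >= 3 — outside the function's binary-string specification — on which A raises ValueError/IndexError or, where it returns, its value and B's are two choices on a corner no caller would specify.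
-- outside the precondition, e.g. on numWays('502'): A returns 0, B returns 1; on numWays('120'): A returns 3, B returns 0
import Mathlib
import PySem

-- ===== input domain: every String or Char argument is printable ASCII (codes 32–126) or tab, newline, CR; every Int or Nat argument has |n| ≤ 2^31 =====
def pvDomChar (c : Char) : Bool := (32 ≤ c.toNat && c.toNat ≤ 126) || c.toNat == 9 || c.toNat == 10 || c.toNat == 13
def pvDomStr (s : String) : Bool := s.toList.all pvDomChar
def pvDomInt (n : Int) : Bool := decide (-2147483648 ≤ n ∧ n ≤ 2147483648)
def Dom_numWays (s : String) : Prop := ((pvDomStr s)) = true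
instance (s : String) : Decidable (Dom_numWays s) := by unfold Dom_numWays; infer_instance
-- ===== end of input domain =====

-- B builds the list of positions of the ones once and reads both cut gaps by
-- subtraction, instead of A's two directional counting scans (while-loop + str.find,
-- once more on the reversed string); objective: simpler (same O(n) cost).

-- ===== PORT A =====

-- int(c) for a one-character string (sum(map(int, s))); ValueError = none, outside Pre_
def pyIntChar (c : Char) : Int := (PySem.Int.ofChars? [c]).getD 0

-- the while loop of count_zeros plus its return expression; fuel = remaining length;
-- fuel 0 with the loop still running / index out of range = IndexError, unreachable inside Pre_
def czAux (ss : List Char) (q : Int) (ones : Int) (idx : Int) : Nat → Int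
  | 0 => if ones < q then 0
         else PySem.Chars.findFrom ss ['1'] idx none - idx + 1
  | Nat.succ f =>
      if ones < q then
        match PySem.List.pyGet? ss idx with
        | none => 0
        | some c => czAux ss q (ones + if c = '1' then 1 else 0) (idx + 1) f
      else PySem.Chars.findFrom ss ['1'] idx none - idx + 1

def countZeros (ss : List Char) (q : Int) : Int := czAux ss q 0 0 ss.length

def numWays (s : String) : Int :=
  let MOD : Int := 10 ^ 9 + 7
  let cs := s.toList
  let n : Int := (cs.length : Int)
  if n < 3 then 0
  else
    let numOnes : Int := cs.foldl (fun a c => a + pyIntChar c) 0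
    let q := PySem.Int.floordiv numOnes 3
    let r := PySem.Int.mod numOnes 3
    if r ≠ 0 then 0
    else if q = 0 then PySem.Int.mod (PySem.Int.floordiv ((n - 2) * (n - 1)) 2) MOD
    else
      let l := countZeros cs q
      let rr := countZeros ((PySem.List.slice? cs none none (-1)).getD []) q
      PySem.Int.mod (l * rr) MOD

-- ===== PORT B =====

-- [i for i, c in enumerate(s) if c == '1']
def posOnes : List Char → Int → List Int
  | [], _ => []
  | c :: t, i => if c = '1' then i :: posOnes t (i + 1) else posOnes t (i + 1)

def numWays_alt (s : String) : Int :=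
  let MOD : Int := 10 ^ 9 + 7
  let cs := s.toList
  let n : Int := (cs.length : Int)
  if n < 3 then 0
  else
    let pos := posOnes cs 0
    let m : Int := (pos.length : Int)
    if PySem.Int.mod m 3 ≠ 0 then 0
    else if m = 0 then PySem.Int.mod (PySem.Int.floordiv ((n - 2) * (n - 1)) 2) MOD
    else
      let q := PySem.Int.floordiv m 3
      PySem.Int.mod
        (((PySem.List.pyGet? pos q).getD 0 - (PySem.List.pyGet? pos (q - 1)).getD 0) *
         ((PySem.List.pyGet? pos (2 * q)).getD 0 - (PySem.List.pyGet? pos (2 * q - 1)).getD 0)) MOD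

-- ===== PRECONDITION & SPEC =====
-- Pre_ restricts strings of length ≥ 3 to the problem's natural domain, binary strings:
-- on other strings A raises ValueError (a non-digit character under int()) or IndexError
-- (the while loop running off the end), and where it does return, the value comes from
-- summing arbitrary digit values and str.find's -1 sentinel — an unspecified corner no
-- caller would rely on, where B instead counts the (absent) ones.
def Pre_numWays (s : String) : Prop :=
  s.toList.length < 3 ∨ s.toList.all (fun c => c = '0' || c = '1') = true
instance (s : String) : Decidable (Pre_numWays s) := by unfold Pre_numWays; infer_instance

def pvWitness_numWays : String := "10101"

def Spec_numWays (s : String) (out : Int) : Prop := out = numWays_alt s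
instance (s : String) (out : Int) : Decidable (Spec_numWays s out) := by unfold Spec_numWays; infer_instance

-- ===== CLAIM (what is proved, stated in full; the proofs are below) =====
def Claim_equal_numWays : Prop := ∀ (s : String), Dom_numWays s → Pre_numWays s → Spec_numWays s (numWays s)

-- ===== LEMMAS AND PROOFS =====

lemma posOnes_shift (cs : List Char) (a : Int) :
    posOnes cs (a + 1) = (posOnes cs a).map (· + 1) := by
  induction cs generalizing a with
  | nil => simp [posOnes]
  | cons c t ih =>
    simp only [posOnes]
    by_cases hc : c = '1' <;> simp [hc, ih (a + 1)]

lemma posOnes_length (cs : List Char) (a : Int) :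
    (posOnes cs a).length = cs.count '1' := by
  induction cs generalizing a with
  | nil => simp [posOnes]
  | cons c t ih =>
    by_cases hc : c = '1' <;> simp [posOnes, hc, ih]

lemma cnt_take_mono (cs : List Char) {a b : Nat} (h : a ≤ b) :
    (cs.take a).count '1' ≤ (cs.take b).count '1' := by
  have h1 : cs.take a = (cs.take b).take a := by
    rw [List.take_take, min_eq_left h]
  rw [h1]
  exact ((cs.take b).take_sublist a).count_le '1'

lemma cnt_take_succ (cs : List Char) (k : Nat) (c : Char) (h : cs[k]? = some c) :
    (cs.take (k + 1)).count '1' = (cs.take k).count '1' + (if c = '1' then 1 else 0) := by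
  rw [List.take_add_one, h]
  by_cases hc : c = '1' <;> simp [hc, List.count_append]

lemma posOnes_char (cs : List Char) (i : Nat) (j : Int) :
    (posOnes cs 0)[i]? = some j ↔
      ∃ jn : Nat, j = (jn : Int) ∧ cs[jn]? = some '1' ∧ (cs.take jn).count '1' = i := by
  induction cs generalizing i j with
  | nil => simp [posOnes]
  | cons c t ih =>
    have hshift : posOnes t 1 = (posOnes t 0).map (· + 1) := by
      have := posOnes_shift t 0
      simpa using this
    by_cases hc : c = '1'
    · subst hc
      cases i with
      | zero =>
        simp only [posOnes, if_true, zero_add, hshift, List.getElem?_cons_zero,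
          Option.some_inj]
        constructor
        · rintro rfl
          exact ⟨0, rfl, by simp, by simp⟩
        · rintro ⟨jn, rfl, hget, hcnt⟩
          cases jn with
          | zero => rfl
          | succ k =>
            exfalso
            have : (('1' :: t).take (k + 1)).count '1' = ((t.take k).count '1') + 1 := by
              simp [List.take_succ_cons]
            omega
      | succ i =>
        simp only [posOnes, if_true, zero_add, hshift, List.getElem?_cons_succ,
          List.getElem?_map]
        constructor
        · intro h
          obtain ⟨j', hj', hmap⟩ := Option.map_eq_some_iff.mp h
          obtain ⟨jn', rfl, hget, hcnt⟩ := (ih i j').mp hj'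
          refine ⟨jn' + 1, by push_cast at hmap ⊢; omega, by simpa using hget, ?_⟩
          simp [List.take_succ_cons, hcnt]
        · rintro ⟨jn, rfl, hget, hcnt⟩
          cases jn with
          | zero => simp at hcnt
          | succ k =>
            have hget' : t[k]? = some '1' := by simpa using hget
            have hcnt' : (t.take k).count '1' = i := by
              have : (('1' :: t).take (k + 1)).count '1' = (t.take k).count '1' + 1 := by
                simp [List.take_succ_cons]
              omega
            rw [(ih i (k : Int)).mpr ⟨k, rfl, hget', hcnt'⟩]
            simp only [Option.map_some, Option.some_inj]
            push_cast
            ring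
    · simp only [posOnes, if_neg hc, zero_add, hshift, List.getElem?_map]
      constructor
      · intro h
        obtain ⟨j', hj', hmap⟩ := Option.map_eq_some_iff.mp h
        obtain ⟨jn', rfl, hget, hcnt⟩ := (ih i j').mp hj'
        refine ⟨jn' + 1, by push_cast at hmap ⊢; omega, by simpa using hget, ?_⟩
        simp [List.take_succ_cons, hc, hcnt]
      · rintro ⟨jn, rfl, hget, hcnt⟩
        cases jn with
        | zero =>
          exfalso
          simp only [List.getElem?_cons_zero, Option.some_inj] at hget
          exact hc hget
        | succ k =>
          have hget' : t[k]? = some '1' := by simpa using hget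
          have hcnt' : (t.take k).count '1' = i := by
            have : ((c :: t).take (k + 1)).count '1' = (t.take k).count '1' := by
              simp [List.take_succ_cons, hc]
            omega
          rw [(ih i (k : Int)).mpr ⟨k, rfl, hget', hcnt'⟩]
          simp only [Option.map_some, Option.some_inj]
          push_cast
          ring

lemma no_one_between (cs : List Char) {i jn1 jn2 : Nat}
    (h1 : (posOnes cs 0)[i]? = some ((jn1 : Nat) : Int))
    (h2 : (posOnes cs 0)[i + 1]? = some ((jn2 : Nat) : Int)) :
    ∀ k : Nat, jn1 < k → k < jn2 → cs[k]? ≠ some '1' := by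
  intro k hk1 hk2 hone
  obtain ⟨jn1', e1, hg1, hc1⟩ := (posOnes_char cs i _).mp h1
  obtain ⟨jn2', e2, hg2, hc2⟩ := (posOnes_char cs (i + 1) _).mp h2
  have e1' : jn1 = jn1' := by exact_mod_cast e1
  have e2' : jn2 = jn2' := by exact_mod_cast e2
  subst e1' e2'
  have hs1 : (cs.take (jn1 + 1)).count '1' = i + 1 := by
    rw [cnt_take_succ cs jn1 '1' hg1]
    simp [hc1]
  have m1 := cnt_take_mono cs (show jn1 + 1 ≤ k from hk1)
  have m2 := cnt_take_mono cs (show k ≤ jn2 from le_of_lt hk2)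
  have hck : (cs.take k).count '1' = i + 1 := by omega
  have hk' := (posOnes_char cs (i + 1) ((k : Nat) : Int)).mpr ⟨k, rfl, hone, hck⟩
  rw [h2] at hk'
  have : jn2 = k := by exact_mod_cast Option.some.inj hk'
  omega

lemma single_prefix (l : List Char) (c : Char) : ([c] <+: l) ↔ l.head? = some c := by
  cases l with
  | nil => simp
  | cons a t => simp [List.cons_prefix_cons, eq_comm]

lemma one_at_iff (cs : List Char) (i : Nat) : (['1'] <+: cs.drop i) ↔ cs[i]? = some '1' := by
  rw [single_prefix, List.head?_drop]

lemma findFrom_eq (cs : List Char) (k j2 : Nat) (hk : k ≤ cs.length)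
    (hj2 : cs[j2]? = some '1') (hge : k ≤ j2)
    (hmin : ∀ i : Nat, k ≤ i → i < j2 → cs[i]? ≠ some '1') :
    PySem.Chars.findFrom cs ['1'] (k : Int) none = (j2 : Int) := by
  have hinfix : ['1'] <:+: cs.drop k := by
    have hpre : ['1'] <+: (cs.drop k).drop (j2 - k) := by
      rw [List.drop_drop, show k + (j2 - k) = j2 from by omega]
      exact (one_at_iff cs j2).mpr hj2
    exact hpre.isInfix.trans ((cs.drop k).drop_suffix (j2 - k)).isInfix
  have hne : PySem.Chars.findFrom cs ['1'] (k : Int) none ≠ -1 := by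
    rw [Ne, PySem.Chars.findFrom_natCast_eq_neg_one_iff cs ['1'] k hk]
    simpa using hinfix
  obtain ⟨hkle, hpref, hminf⟩ := PySem.Chars.findFrom_natCast_spec cs ['1'] k hk hne
  set f := PySem.Chars.findFrom cs ['1'] (k : Int) none with hf
  have hf0 : (0 : Int) ≤ f := le_trans (by exact_mod_cast Nat.zero_le k) hkle
  have hfget : cs[f.toNat]? = some '1' := (one_at_iff cs f.toNat).mp hpref
  have hkf : k ≤ f.toNat := by omega
  have hlt1 : ¬ f.toNat < j2 := fun hlt => hmin f.toNat hkf hlt hfget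
  have hlt2 : ¬ j2 < f.toNat := fun hlt => hminf j2 hge hlt ((one_at_iff cs j2).mpr hj2)
  omega

lemma czAux_run (cs : List Char) (qn jn1 jn2 : Nat) (hq : 1 ≤ qn)
    (h1 : (posOnes cs 0)[qn - 1]? = some ((jn1 : Nat) : Int))
    (h2 : (posOnes cs 0)[qn]? = some ((jn2 : Nat) : Int)) :
    ∀ d k : Nat, k + d = jn1 + 1 →
      czAux cs (qn : Int) (((cs.take k).count '1' : Nat) : Int) (k : Int) (cs.length - k) =
        (jn2 : Int) - (jn1 : Int) := by
  obtain ⟨jn1', e1, hg1, hc1⟩ := (posOnes_char cs (qn - 1) _).mp h1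
  obtain ⟨jn2', e2, hg2, hc2⟩ := (posOnes_char cs qn _).mp h2
  have e1' : jn1 = jn1' := by exact_mod_cast e1
  have e2' : jn2 = jn2' := by exact_mod_cast e2
  subst e1' e2'
  have hlen1 : jn1 < cs.length := (List.getElem?_eq_some_iff.mp hg1).1
  have hlen2 : jn2 < cs.length := (List.getElem?_eq_some_iff.mp hg2).1
  have hlt : jn1 < jn2 := by
    by_contra hcon
    have := cnt_take_mono cs (show jn2 ≤ jn1 by omega)
    omega
  have h2' : (posOnes cs 0)[(qn - 1) + 1]? = some ((jn2 : Nat) : Int) := by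
    rw [show qn - 1 + 1 = qn by omega]
    exact h2
  have hmin : ∀ i : Nat, jn1 + 1 ≤ i → i < jn2 → cs[i]? ≠ some '1' :=
    fun i hi1 hi2 => no_one_between cs h1 h2' i (by omega) hi2
  intro d
  induction d with
  | zero =>
    intro k hk
    have hk' : k = jn1 + 1 := by omega
    subst hk'
    have hcnt : (cs.take (jn1 + 1)).count '1' = qn := by
      rw [cnt_take_succ cs jn1 '1' hg1]
      simp
      omega
    have hcond : ¬ (((cs.take (jn1 + 1)).count '1' : Int) < (qn : Int)) := by
      rw [hcnt]
      exact lt_irrefl _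
    have hff : PySem.Chars.findFrom cs ['1'] ((jn1 + 1 : Nat) : Int) none = (jn2 : Int) :=
      findFrom_eq cs (jn1 + 1) jn2 (by omega) hg2 (by omega) hmin
    cases hfe : cs.length - (jn1 + 1) <;>
      (simp only [czAux]; rw [if_neg hcond, hff]; push_cast; ring)
  | succ d ihd =>
    intro k hk
    have hklt : k ≤ jn1 := by omega
    have hcle : (cs.take k).count '1' ≤ qn - 1 := by
      have := cnt_take_mono cs hklt
      omega
    have hkn : k < cs.length := lt_of_le_of_lt hklt hlen1
    have hfuel : cs.length - k = (cs.length - (k + 1)) + 1 := by omega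
    rw [hfuel]
    simp only [czAux]
    rw [if_pos (by exact_mod_cast (by omega : (cs.take k).count '1' < qn))]
    have hget : PySem.List.pyGet? cs (k : Int) = cs[k]? := by
      simp [PySem.List.pyGet?_natCast]
    obtain ⟨ck, hck⟩ : ∃ ck, cs[k]? = some ck := ⟨cs[k], List.getElem?_eq_getElem hkn⟩
    rw [hget, hck]
    dsimp only
    have hacc : (((cs.take k).count '1' : Nat) : Int) + (if ck = '1' then 1 else 0) =
        (((cs.take (k + 1)).count '1' : Nat) : Int) := by
      rw [cnt_take_succ cs k ck hck]
      by_cases h : ck = '1' <;> simp [h]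
    rw [hacc, show (k : Int) + 1 = ((k + 1 : Nat) : Int) by omega]
    exact ihd (k + 1) (by omega)

lemma pyIntChar_zero : pyIntChar '0' = 0 := by decide

lemma pyIntChar_one : pyIntChar '1' = 1 := by decide

lemma sum_fold (cs : List Char) :
    (∀ c ∈ cs, c = '0' ∨ c = '1') → ∀ a0 : Int,
      cs.foldl (fun a c => a + pyIntChar c) a0 = a0 + (cs.count '1' : Int) := by
  induction cs with
  | nil => intro _ a0; simp
  | cons c t ih =>
    intro h a0
    have ht : ∀ x ∈ t, x = '0' ∨ x = '1' := fun x hx => h x (List.mem_cons_of_mem _ hx)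
    rcases h c List.mem_cons_self with hc | hc <;> subst hc
    · rw [List.foldl_cons, ih ht, List.count_cons_of_ne (by decide : ('0' : Char) ≠ '1')]
      simp [pyIntChar_zero]
    · rw [List.foldl_cons, ih ht, List.count_cons_self]
      simp [pyIntChar_one]
      ring

lemma posOnes_reverse_get (cs : List Char) (i : Nat) (j : Int)
    (h : (posOnes cs.reverse 0)[i]? = some j) :
    ∃ jn : Nat, j = (jn : Int) ∧ jn < cs.length ∧
      (posOnes cs 0)[cs.count '1' - 1 - i]? = some ((cs.length : Int) - 1 - j) := by
  obtain ⟨jn, rfl, hg, hcnt⟩ := (posOnes_char cs.reverse i _).mp h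
  have hjn : jn < cs.length := by
    have := (List.getElem?_eq_some_iff.mp hg).1
    simpa using this
  have hrev : cs.reverse[jn]? = cs[cs.length - 1 - jn]? := by
    rw [List.getElem?_reverse (by simpa using hjn)]
  have hg' : cs[cs.length - 1 - jn]? = some '1' := by rw [← hrev]; exact hg
  have htake : cs.reverse.take jn = (cs.drop (cs.length - jn)).reverse := by
    rw [List.take_reverse]
  have hcnt2 : (cs.drop (cs.length - jn)).count '1' = i := by
    rw [← List.count_reverse, ← htake]
    exact hcnt
  have hsplit : (cs.take (cs.length - jn)).count '1' + (cs.drop (cs.length - jn)).count '1' =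
      cs.count '1' := by
    rw [← List.count_append, List.take_append_drop]
  have hsucc : (cs.take (cs.length - 1 - jn + 1)).count '1' =
      (cs.take (cs.length - 1 - jn)).count '1' + 1 := by
    rw [cnt_take_succ cs _ '1' hg']
    simp
  have he : cs.length - 1 - jn + 1 = cs.length - jn := by omega
  rw [he] at hsucc
  refine ⟨jn, rfl, hjn, ?_⟩
  have hres := (posOnes_char cs (cs.count '1' - 1 - i) ((cs.length - 1 - jn : Nat) : Int)).mpr
    ⟨cs.length - 1 - jn, rfl, hg', by omega⟩
  rw [hres]
  congr 1
  omega

-- ===== VERDICT (by name: the statement is the Claim_ definition above) =====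
theorem numWays_spec : Claim_equal_numWays := by
  unfold Claim_equal_numWays
  intro s _ hpre
  unfold Spec_numWays numWays numWays_alt countZeros
  dsimp only
  by_cases hn : ((s.toList.length : Int) < 3)
  · rw [if_pos hn, if_pos hn]
  · rw [if_neg hn, if_neg hn]
    have hbin : ∀ c ∈ s.toList, c = '0' ∨ c = '1' := by
      rcases hpre with h | h
      · exfalso
        push_cast at hn
        omega
      · intro c hc
        have := List.all_eq_true.mp h c hc
        simpa using this
    rw [sum_fold _ hbin 0, zero_add, posOnes_length]
    set mn := s.toList.count '1' with hmn
    have hfd : PySem.Int.floordiv (mn : Int) 3 = ((mn / 3 : Nat) : Int) := by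
      exact_mod_cast PySem.Int.floordiv_natCast mn 3
    have hmd : PySem.Int.mod (mn : Int) 3 = ((mn % 3 : Nat) : Int) := by
      exact_mod_cast PySem.Int.mod_natCast mn 3
    rw [hfd, hmd]
    by_cases hr : mn % 3 = 0
    · have hA1 : ¬ (((mn % 3 : Nat) : Int) ≠ 0) := by simp [hr]
      rw [if_neg hA1, if_neg hA1]
      by_cases hm0 : mn = 0
      · have h2 : (((mn / 3 : Nat) : Int) = 0) := by simp [hm0]
        have h3 : ((mn : Nat) : Int) = 0 := by simp [hm0]
        rw [if_pos h2, if_pos h3]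
      · have hq1 : 1 ≤ mn / 3 := by omega
        have h2 : ¬ (((mn / 3 : Nat) : Int) = 0) := by
          intro h
          have h' : mn / 3 = 0 := by exact_mod_cast h
          omega
        have h3 : ¬ (((mn : Nat) : Int) = 0) := by
          intro h
          exact hm0 (by exact_mod_cast h)
        rw [if_neg h2, if_neg h3]
        set qn := mn / 3 with hqn
        have hmn3 : mn = 3 * qn := by omega
        set P := posOnes s.toList 0 with hP
        have hPlen : P.length = mn := posOnes_length _ _
        have hidx : ∀ i : Nat, i < mn → ∃ jn : Nat, P[i]? = some ((jn : Nat) : Int) ∧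
            s.toList[jn]? = some '1' ∧ (s.toList.take jn).count '1' = i := by
          intro i hi
          have hi' : i < P.length := by omega
          obtain ⟨j, hj⟩ : ∃ j, P[i]? = some j := ⟨P[i], List.getElem?_eq_getElem hi'⟩
          obtain ⟨jn, rfl, hg, hc⟩ := (posOnes_char _ i j).mp hj
          exact ⟨jn, hj, hg, hc⟩
        obtain ⟨a1, ha1, hga1, hca1⟩ := hidx (qn - 1) (by omega)
        obtain ⟨a2, ha2, hga2, hca2⟩ := hidx qn (by omega)
        obtain ⟨b1, hb1, hgb1, hcb1⟩ := hidx (2 * qn - 1) (by omega)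
        obtain ⟨b2, hb2, hgb2, hcb2⟩ := hidx (2 * qn) (by omega)
        have hA1 : czAux s.toList (qn : Int) 0 0 s.toList.length = (a2 : Int) - (a1 : Int) := by
          have := czAux_run s.toList qn a1 a2 hq1 ha1 ha2 (a1 + 1) 0 (by omega)
          simpa using this
        rw [PySem.List.slice?_none_none_neg_one, Option.getD_some]
        set R := posOnes s.toList.reverse 0 with hR
        have hRlen : R.length = mn := by
          rw [hR, posOnes_length, List.count_reverse]
        obtain ⟨c1, hc1⟩ : ∃ j, R[qn - 1]? = some j :=
          ⟨R[qn - 1]'(by omega), List.getElem?_eq_getElem (by omega)⟩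
        obtain ⟨c2, hc2⟩ : ∃ j, R[qn]? = some j :=
          ⟨R[qn]'(by omega), List.getElem?_eq_getElem (by omega)⟩
        obtain ⟨cn1, rfl, hcn1lt, hlink1⟩ := posOnes_reverse_get _ _ _ hc1
        obtain ⟨cn2, rfl, hcn2lt, hlink2⟩ := posOnes_reverse_get _ _ _ hc2
        rw [show mn - 1 - (qn - 1) = 2 * qn from by omega] at hlink1
        rw [show mn - 1 - qn = 2 * qn - 1 from by omega] at hlink2
        rw [hb2] at hlink1
        rw [hb1] at hlink2
        have e1 : (b2 : Int) = (s.toList.length : Int) - 1 - (cn1 : Int) :=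
          Option.some.inj hlink1
        have e2 : (b1 : Int) = (s.toList.length : Int) - 1 - (cn2 : Int) :=
          Option.some.inj hlink2
        have hA2 : czAux s.toList.reverse (qn : Int) 0 0 s.toList.reverse.length =
            (cn2 : Int) - (cn1 : Int) := by
          have := czAux_run s.toList.reverse qn cn1 cn2 hq1 hc1 hc2 (cn1 + 1) 0 (by omega)
          simpa using this
        rw [hA1, hA2]
        have hBq : (PySem.List.pyGet? P ((qn : Nat) : Int)).getD 0 = (a2 : Int) := by
          rw [PySem.List.pyGet?_natCast, ha2, Option.getD_some]
        have hBq1 : (PySem.List.pyGet? P (((qn : Nat) : Int) - 1)).getD 0 = (a1 : Int) := by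
          rw [show ((qn : Nat) : Int) - 1 = ((qn - 1 : Nat) : Int) by omega,
            PySem.List.pyGet?_natCast, ha1, Option.getD_some]
        have hB2q : (PySem.List.pyGet? P (2 * ((qn : Nat) : Int))).getD 0 = (b2 : Int) := by
          rw [show 2 * ((qn : Nat) : Int) = ((2 * qn : Nat) : Int) by push_cast; ring,
            PySem.List.pyGet?_natCast, hb2, Option.getD_some]
        have hB2q1 : (PySem.List.pyGet? P (2 * ((qn : Nat) : Int) - 1)).getD 0 = (b1 : Int) := by
          rw [show 2 * ((qn : Nat) : Int) - 1 = ((2 * qn - 1 : Nat) : Int) by omega,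
            PySem.List.pyGet?_natCast, hb1, Option.getD_some]
        rw [hBq, hBq1, hB2q, hB2q1]
        congr 1
        have : (cn2 : Int) - (cn1 : Int) = (b2 : Int) - (b1 : Int) := by omega
        rw [this]
    · have hA1 : (((mn % 3 : Nat) : Int) ≠ 0) := by
        intro h
        exact hr (by exact_mod_cast h)
      rw [if_pos hA1, if_pos hA1]
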